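-- pv_equiv track=rewrite | github.com/dybala-21/rune | rune/agent/workspace_guard.py | _scan_path_candidates
-- ===== SOURCE A (Python) =====
-- _PATH_DELIMITER_CHARS = frozenset('"\'`,;|)([]{}<>')
--
-- def _trim_path_token(token: str) -> str:
--     """Strip trailing delimiters from a path token."""
--     out = token.strip()
--     while out:
--         tail = out[-1]
--         if tail in ")]},.;:":
--             out = out[:-1]
--             continue
--         break
--     return out
--
-- def _is_path_start(s: str, idx: int) -> bool:
--     """Check if a path-like token starts at index."""
--     ch = s[idx]
--     if ch == "/":
--         return True
--     if ch == "~" and idx + 1 < len(s) and s[idx + 1] == "/":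
--         return True
--     if ch == ".":
--         if idx + 1 < len(s) and s[idx + 1] == "/":
--             return True
--         if idx + 2 < len(s) and s[idx + 1] == "." and s[idx + 2] == "/":
--             return True
--     return False
--
-- def _normalize_extracted_path_token(raw: str) -> str:
--     """Normalize a raw path token extracted from text."""
--     token = _trim_path_token(raw)
--     if not token:
--         return ""
--     if token.startswith("//"):
--         return ""
--     if not (
--         token.startswith("/")
--         or token.startswith("./")
--         or token.startswith("../")
--         or token.startswith("~/")
--     ):
--         return ""
--     return token
--
-- def _scan_path_candidates(text: str) -> list[tuple[str, int, int]]: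
--     """Scan text for path-like candidates. Returns [(token, start, end)]."""
--     candidates: list[tuple[str, int, int]] = []
--     i = 0
--     while i < len(text):
--         if not _is_path_start(text, i):
--             i += 1
--             continue
--         # Check boundary before path
--         if i > 0 and text[i - 1] not in (" ", "\t", "\n", "\r", "(", "[", "{", '"', "'", "`"):
--             i += 1
--             continue
--
--         end = i
--         while end < len(text) and text[end] not in (" ", "\t", "\n", "\r") and text[end] not in _PATH_DELIMITER_CHARS:
--             end += 1
--
--         raw_token = text[i:end]
--         token = _normalize_extracted_path_token(raw_token)
--         if not token:
--             i = max(end, i + 1)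
--             continue
--
--         candidates.append((token, i, i + len(token)))
--         i = max(end, i + 1)
--
--     return candidates
-- ===== SOURCE B (Python) =====
-- _PATH_DELIMITER_CHARS = frozenset('"\'`,;|)([]{}<>')
-- _RUN_TERMINATORS = frozenset(' \t\n\r') | _PATH_DELIMITER_CHARS
-- _BOUNDARY_BEFORE = frozenset(' \t\n\r([{"\'`')
--
--
-- def _trim_path_token(token: str) -> str:
--     out = token.strip()
--     while out and out[-1] in ")]},.;:":
--         out = out[:-1]
--     return out
--
--
-- def _is_path_start(s: str, idx: int) -> bool:
--     ch = s[idx]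
--     if ch == "/":
--         return True
--     if ch == "~" and idx + 1 < len(s) and s[idx + 1] == "/":
--         return True
--     if ch == ".":
--         if idx + 1 < len(s) and s[idx + 1] == "/":
--             return True
--         if idx + 2 < len(s) and s[idx + 1] == "." and s[idx + 2] == "/":
--             return True
--     return False
--
--
-- def _normalize_extracted_path_token(raw: str) -> str:
--     token = _trim_path_token(raw)
--     if not token:
--         return ""
--     if token.startswith("//"):
--         return ""
--     if not (token.startswith("/") or token.startswith("./")
--             or token.startswith("../") or token.startswith("~/")):
--         return ""
--     return token
--
--
-- def _runs(text):
--     """Maximal runs of characters outside whitespace/delimiters, as (start, end)."""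
--     runs = []
--     i, n = 0, len(text)
--     while i < n:
--         if text[i] in _RUN_TERMINATORS:
--             i += 1
--             continue
--         j = i
--         while j < n and text[j] not in _RUN_TERMINATORS:
--             j += 1
--         runs.append((i, j))
--         i = j
--     return runs
--
--
-- def _scan_path_candidates(text: str) -> list:
--     candidates = []
--     for s, e in _runs(text):
--         if s > 0 and text[s - 1] not in _BOUNDARY_BEFORE:
--             continue
--         if not _is_path_start(text, s):
--             continue
--         token = _normalize_extracted_path_token(text[s:e])
--         if token:
--             candidates.append((token, s, s + len(token)))
--     return candidates
-- ===== Notes on version B (the rewrite author's own statement) =====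
-- stated objective: idiomatic
-- what changed: Replaced the fused index-jumping while-loop state machine with a two-phase tokenize-then-filter decomposition: first compute all maximal runs of non-terminator characters with their spans, then keep exactly the runs that start at a boundary, pass the path-start test and normalize to a non-empty token.
import Mathlib
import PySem

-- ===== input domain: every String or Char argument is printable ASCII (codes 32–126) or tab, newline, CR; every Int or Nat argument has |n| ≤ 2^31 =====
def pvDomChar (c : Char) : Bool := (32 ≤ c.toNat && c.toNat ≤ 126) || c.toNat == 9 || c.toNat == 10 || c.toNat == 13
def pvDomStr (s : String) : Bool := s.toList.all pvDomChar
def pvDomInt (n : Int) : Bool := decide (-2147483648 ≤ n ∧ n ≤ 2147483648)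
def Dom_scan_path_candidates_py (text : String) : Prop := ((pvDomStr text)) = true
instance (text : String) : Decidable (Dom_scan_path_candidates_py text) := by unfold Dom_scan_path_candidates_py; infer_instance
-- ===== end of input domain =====

-- B replaces A's fused index-jumping scan with a tokenize-then-filter decomposition
-- (compute maximal runs, then filter/normalize them); same output, same O(n) cost.
-- While loops are ported as structural recursion on an explicit fuel that bounds the
-- remaining indices (exact: each loop advances its index by at least 1 per step).

-- ===== shared module helpers (Python module-level helpers used by both A and B) =====

-- membership in the whitespace tuple (" ", "\t", "\n", "\r")
def pvWsChar (c : Char) : Bool :=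
  c == ' ' || c == '\t' || c == '\n' || c == '\r'

-- membership in _PATH_DELIMITER_CHARS = frozenset('"\'`,;|)([]{}<>')
def pvDelimChar (c : Char) : Bool :=
  c == '"' || c == '\'' || c == '`' || c == ',' || c == ';' || c == '|' ||
  c == ')' || c == '(' || c == '[' || c == ']' || c == '{' || c == '}' ||
  c == '<' || c == '>'

-- membership in the boundary-before set (" ", "\t", "\n", "\r", "(", "[", "{", '"', "'", "`")
def pvBoundaryChar (c : Char) : Bool :=
  pvWsChar c || c == '(' || c == '[' || c == '{' || c == '"' || c == '\'' || c == '`'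

-- _trim_path_token's while loop: strip trailing ")]},.;:" characters
def pvTrimLoopGo : Nat → List Char → List Char
  | 0, out => out
  | fuel+1, out =>
    if h : out ≠ [] then
      if (")]},.;:".toList).contains (out.getLast h) then pvTrimLoopGo fuel out.dropLast
      else out
    else out

-- _trim_path_token
def pvTrimPathToken (token : List Char) : List Char :=
  pvTrimLoopGo (PySem.Chars.strip token).length (PySem.Chars.strip token)

-- _is_path_start (callers always pass idx < len, where getD is exact for s[idx])
def pvIsPathStart (l : List Char) (i : Nat) : Bool :=
  if l.getD i ' ' = '/' then true
  else if l.getD i ' ' = '~' ∧ i + 1 < l.length ∧ l.getD (i+1) ' ' = '/' then true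
  else if l.getD i ' ' = '.' then
    if i + 1 < l.length ∧ l.getD (i+1) ' ' = '/' then true
    else if i + 2 < l.length ∧ l.getD (i+1) ' ' = '.' ∧ l.getD (i+2) ' ' = '/' then true
    else false
  else false

-- _normalize_extracted_path_token
def pvNormalize (raw : List Char) : List Char :=
  let token := pvTrimPathToken raw
  if token = [] then []
  else if PySem.Chars.startswith token ['/', '/'] then []
  else if ¬(PySem.Chars.startswith token ['/'] = true ∨
            PySem.Chars.startswith token ['.', '/'] = true ∨
            PySem.Chars.startswith token ['.', '.', '/'] = true ∨
            PySem.Chars.startswith token ['~', '/'] = true) then []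
  else token

-- ===== PORT A =====

-- A's inner while: advance end while text[end] is neither whitespace nor a delimiter
def pvEndScanGo (l : List Char) : Nat → Nat → Nat
  | 0, e => e
  | fuel+1, e =>
    if e < l.length ∧ pvWsChar (l.getD e ' ') = false ∧ pvDelimChar (l.getD e ' ') = false
    then pvEndScanGo l fuel (e+1) else e

def pvEndScan (l : List Char) (e : Nat) : Nat := pvEndScanGo l (l.length - e) e

-- A's outer while loop (candidates emitted in order)
def pvLoopAGo (l : List Char) : Nat → Nat → List (String × Int × Int)
  | 0, _ => []
  | fuel+1, i =>
    if i < l.length then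
      if pvIsPathStart l i = false then pvLoopAGo l fuel (i+1)
      else if 0 < i ∧ pvBoundaryChar (l.getD (i-1) ' ') = false then pvLoopAGo l fuel (i+1)
      else
        if pvNormalize (PySem.List.slice l (some (i:Int)) (some ((pvEndScan l i : Nat):Int))) = [] then
          pvLoopAGo l fuel (Nat.max (pvEndScan l i) (i+1))
        else
          (String.ofList (pvNormalize (PySem.List.slice l (some (i:Int)) (some ((pvEndScan l i : Nat):Int)))),
           (i:Int),
           (i:Int) + (pvNormalize (PySem.List.slice l (some (i:Int)) (some ((pvEndScan l i : Nat):Int)))).length) ::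
          pvLoopAGo l fuel (Nat.max (pvEndScan l i) (i+1))
    else []

def pvLoopA (l : List Char) (i : Nat) : List (String × Int × Int) :=
  pvLoopAGo l (l.length - i) i

def scan_path_candidates_py (text : String) : List (String × Int × Int) :=
  pvLoopA text.toList 0

-- ===== PORT B =====

-- B's _RUN_TERMINATORS = whitespace ∪ delimiters
def pvTermChar (c : Char) : Bool := pvWsChar c || pvDelimChar c

-- B's inner run-extension loop
def pvRunEndGo (l : List Char) : Nat → Nat → Nat
  | 0, j => j
  | fuel+1, j =>
    if j < l.length ∧ pvTermChar (l.getD j ' ') = false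
    then pvRunEndGo l fuel (j+1) else j

def pvRunEnd (l : List Char) (j : Nat) : Nat := pvRunEndGo l (l.length - j) j

-- B's _runs: maximal runs of non-terminator characters as (start, end) pairs
def pvRunsGo (l : List Char) : Nat → Nat → List (Nat × Nat)
  | 0, _ => []
  | fuel+1, i =>
    if i < l.length then
      if pvTermChar (l.getD i ' ') then pvRunsGo l fuel (i+1)
      else (i, pvRunEnd l i) :: pvRunsGo l fuel (pvRunEnd l i)
    else []

def pvRuns (l : List Char) (i : Nat) : List (Nat × Nat) := pvRunsGo l (l.length - i) i

-- B's per-run filter (the body of B's for loop)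
def pvFilt (l : List Char) (se : Nat × Nat) : Option (String × Int × Int) :=
  if 0 < se.1 ∧ pvBoundaryChar (l.getD (se.1 - 1) ' ') = false then none
  else if pvIsPathStart l se.1 = false then none
  else
    if pvNormalize (PySem.List.slice l (some (se.1:Int)) (some ((se.2:Nat):Int))) = [] then none
    else some (String.ofList (pvNormalize (PySem.List.slice l (some (se.1:Int)) (some ((se.2:Nat):Int)))),
               (se.1:Int),
               (se.1:Int) + (pvNormalize (PySem.List.slice l (some (se.1:Int)) (some ((se.2:Nat):Int)))).length)

def scan_path_candidates_py_alt (text : String) : List (String × Int × Int) :=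
  (pvRuns text.toList 0).filterMap (pvFilt text.toList)

-- ===== PRECONDITION & SPEC =====
def Spec_scan_path_candidates_py (text : String) (out : List (String × Int × Int)) : Prop := out = scan_path_candidates_py_alt text
instance (text : String) (out : List (String × Int × Int)) : Decidable (Spec_scan_path_candidates_py text out) := by unfold Spec_scan_path_candidates_py; infer_instance

-- ===== CLAIM (what is proved, stated in full; the proofs are below) =====
def Claim_equal_scan_path_candidates_py : Prop := ∀ (text : String), Dom_scan_path_candidates_py text → Spec_scan_path_candidates_py text (scan_path_candidates_py text)

-- ===== LEMMAS AND PROOFS =====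

-- every boundary-before character is a run terminator
theorem boundary_of_term (c : Char) (h : pvTermChar c = false) : pvBoundaryChar c = false := by
  simp [pvTermChar, pvWsChar, pvDelimChar, pvBoundaryChar] at *
  tauto

-- a terminator character can never begin a path token
theorem pathStart_of_term (l : List Char) (i : Nat)
    (h : pvTermChar (l.getD i ' ') = true) : pvIsPathStart l i = false := by
  unfold pvIsPathStart
  split_ifs with h1 h2 h3 h4 h5
  · rw [h1] at h; simp [pvTermChar, pvWsChar, pvDelimChar] at h
  · rw [h2.1] at h; simp [pvTermChar, pvWsChar, pvDelimChar] at h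
  · rw [h3] at h; simp [pvTermChar, pvWsChar, pvDelimChar] at h
  · rw [h3] at h; simp [pvTermChar, pvWsChar, pvDelimChar] at h
  · rfl
  · rfl

-- pvRunEndGo's result does not depend on the fuel, as long as it is sufficient
theorem pvRunEndGo_congr (l : List Char) :
    ∀ f1 f2 e, l.length - e ≤ f1 → l.length - e ≤ f2 → pvRunEndGo l f1 e = pvRunEndGo l f2 e := by
  intro f1
  induction f1 with
  | zero =>
    intro f2 e h1 _
    cases f2 with
    | zero => rfl
    | succ f =>
      simp only [pvRunEndGo]
      rw [if_neg (fun hc => by omega)]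
  | succ f1 ih =>
    intro f2 e h1 h2
    by_cases hc : e < l.length ∧ pvTermChar (l.getD e ' ') = false
    · cases f2 with
      | zero => omega
      | succ f2' =>
        simp only [pvRunEndGo]
        rw [if_pos hc, if_pos hc]
        exact ih f2' (e+1) (by omega) (by omega)
    · cases f2 with
      | zero => simp only [pvRunEndGo]; rw [if_neg hc]
      | succ f2' => simp only [pvRunEndGo]; rw [if_neg hc, if_neg hc]

theorem pvRunEnd_succ (l : List Char) (i : Nat) (h1 : i < l.length)
    (h2 : pvTermChar (l.getD i ' ') = false) : pvRunEnd l i = pvRunEnd l (i+1) := by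
  unfold pvRunEnd
  obtain ⟨k, hk⟩ : ∃ k, l.length - i = k + 1 := ⟨l.length - (i+1), by omega⟩
  rw [hk]
  simp only [pvRunEndGo]
  rw [if_pos ⟨h1, h2⟩]
  exact pvRunEndGo_congr l k (l.length - (i+1)) (i+1) (by omega) (by omega)

theorem pvRunEnd_stop (l : List Char) (i : Nat)
    (h : ¬(i < l.length ∧ pvTermChar (l.getD i ' ') = false)) : pvRunEnd l i = i := by
  unfold pvRunEnd
  cases hk : l.length - i with
  | zero => rfl
  | succ k => simp only [pvRunEndGo]; rw [if_neg h]

theorem pvRunEndGo_ge (l : List Char) : ∀ f j, j ≤ pvRunEndGo l f j := by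
  intro f
  induction f with
  | zero => intro j; exact le_refl j
  | succ f ih =>
    intro j
    simp only [pvRunEndGo]
    split
    · exact le_trans (Nat.le_succ j) (ih (j+1))
    · exact le_refl j

theorem pvRunEnd_ge (l : List Char) (j : Nat) : j ≤ pvRunEnd l j :=
  pvRunEndGo_ge l (l.length - j) j

-- A's inner while is B's run-extension loop (conditions are Boolean-equivalent)
theorem pvEndScanGo_eq (l : List Char) : ∀ f e, pvEndScanGo l f e = pvRunEndGo l f e := by
  intro f
  induction f with
  | zero => intro e; rfl
  | succ f ih =>
    intro e
    have hc : (e < l.length ∧ pvWsChar (l.getD e ' ') = false ∧ pvDelimChar (l.getD e ' ') = false)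
        ↔ (e < l.length ∧ pvTermChar (l.getD e ' ') = false) := by
      simp [pvTermChar]
    simp only [pvEndScanGo, pvRunEndGo]
    by_cases h : e < l.length ∧ pvTermChar (l.getD e ' ') = false
    · rw [if_pos (hc.mpr h), if_pos h]; exact ih (e+1)
    · rw [if_neg (fun hx => h (hc.mp hx)), if_neg h]

theorem pvEndScan_eq (l : List Char) (e : Nat) : pvEndScan l e = pvRunEnd l e :=
  pvEndScanGo_eq l (l.length - e) e

-- fuel irrelevance for pvRunsGo
theorem pvRunsGo_congr (l : List Char) :
    ∀ f1 f2 i, l.length - i ≤ f1 → l.length - i ≤ f2 → pvRunsGo l f1 i = pvRunsGo l f2 i := by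
  intro f1
  induction f1 with
  | zero =>
    intro f2 i h1 _
    cases f2 with
    | zero => rfl
    | succ f => simp only [pvRunsGo]; rw [if_neg (by omega)]
  | succ f1 ih =>
    intro f2 i h1 h2
    by_cases hi : i < l.length
    · cases f2 with
      | zero => omega
      | succ f2' =>
        simp only [pvRunsGo]
        rw [if_pos hi, if_pos hi]
        by_cases ht : pvTermChar (l.getD i ' ') = true
        · rw [if_pos ht, if_pos ht]
          exact ih f2' (i+1) (by omega) (by omega)
        · rw [if_neg ht, if_neg ht]
          have hge : i + 1 ≤ pvRunEnd l i := by
            rw [pvRunEnd_succ l i hi (by simpa using ht)]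
            exact pvRunEnd_ge l (i+1)
          rw [ih f2' (pvRunEnd l i) (by omega) (by omega)]
    · cases f2 with
      | zero => simp only [pvRunsGo]; rw [if_neg hi]
      | succ f2' => simp only [pvRunsGo]; rw [if_neg hi, if_neg hi]

-- one-step unfolding of pvRuns
theorem pvRuns_stop (l : List Char) (i : Nat) (hi : ¬ i < l.length) : pvRuns l i = [] := by
  unfold pvRuns
  cases hk : l.length - i with
  | zero => rfl
  | succ k => simp only [pvRunsGo]; rw [if_neg hi]

theorem pvRuns_term (l : List Char) (i : Nat) (hi : i < l.length)
    (ht : pvTermChar (l.getD i ' ') = true) : pvRuns l i = pvRuns l (i+1) := by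
  unfold pvRuns
  obtain ⟨k, hk⟩ : ∃ k, l.length - i = k + 1 := ⟨l.length - (i+1), by omega⟩
  rw [hk]
  simp only [pvRunsGo]
  rw [if_pos hi, if_pos ht]
  exact pvRunsGo_congr l k (l.length - (i+1)) (i+1) (by omega) (by omega)

theorem pvRuns_run (l : List Char) (i : Nat) (hi : i < l.length)
    (ht : pvTermChar (l.getD i ' ') = false) :
    pvRuns l i = (i, pvRunEnd l i) :: pvRuns l (pvRunEnd l i) := by
  unfold pvRuns
  obtain ⟨k, hk⟩ : ∃ k, l.length - i = k + 1 := ⟨l.length - (i+1), by omega⟩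
  rw [hk]
  simp only [pvRunsGo]
  rw [if_pos hi, if_neg (by simp only [ht]; exact Bool.false_ne_true)]
  have hge : i + 1 ≤ pvRunEnd l i := by
    rw [pvRunEnd_succ l i hi ht]; exact pvRunEnd_ge l (i+1)
  rw [pvRunsGo_congr l k (l.length - pvRunEnd l i) (pvRunEnd l i) (by omega) (by omega)]

-- fuel irrelevance for pvLoopAGo
theorem pvLoopAGo_congr (l : List Char) :
    ∀ f1 f2 i, l.length - i ≤ f1 → l.length - i ≤ f2 → pvLoopAGo l f1 i = pvLoopAGo l f2 i := by
  intro f1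
  induction f1 with
  | zero =>
    intro f2 i h1 _
    cases f2 with
    | zero => rfl
    | succ f => simp only [pvLoopAGo]; rw [if_neg (by omega)]
  | succ f1 ih =>
    intro f2 i h1 h2
    by_cases hi : i < l.length
    · cases f2 with
      | zero => omega
      | succ f2' =>
        have hmax : i + 1 ≤ Nat.max (pvEndScan l i) (i+1) := by
          exact Nat.le_max_right _ _
        simp only [pvLoopAGo]
        rw [if_pos hi, if_pos hi]
        by_cases hps : pvIsPathStart l i = false
        · rw [if_pos hps, if_pos hps]; exact ih f2' (i+1) (by omega) (by omega)
        · rw [if_neg hps, if_neg hps]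
          by_cases hbf : 0 < i ∧ pvBoundaryChar (l.getD (i-1) ' ') = false
          · rw [if_pos hbf, if_pos hbf]; exact ih f2' (i+1) (by omega) (by omega)
          · rw [if_neg hbf, if_neg hbf,
                ih f2' (Nat.max (pvEndScan l i) (i+1)) (by omega) (by omega)]
    · cases f2 with
      | zero => simp only [pvLoopAGo]; rw [if_neg hi]
      | succ f2' => simp only [pvLoopAGo]; rw [if_neg hi, if_neg hi]

-- one-step unfolding of pvLoopA
theorem pvLoopA_stop (l : List Char) (i : Nat) (hi : ¬ i < l.length) : pvLoopA l i = [] := by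
  unfold pvLoopA
  cases hk : l.length - i with
  | zero => rfl
  | succ k => simp only [pvLoopAGo]; rw [if_neg hi]

theorem pvLoopA_skip (l : List Char) (i : Nat) (hi : i < l.length)
    (hps : pvIsPathStart l i = false) : pvLoopA l i = pvLoopA l (i+1) := by
  unfold pvLoopA
  obtain ⟨k, hk⟩ : ∃ k, l.length - i = k + 1 := ⟨l.length - (i+1), by omega⟩
  rw [hk]
  simp only [pvLoopAGo]
  rw [if_pos hi, if_pos hps]
  exact pvLoopAGo_congr l k (l.length - (i+1)) (i+1) (by omega) (by omega)

theorem pvLoopA_skipb (l : List Char) (i : Nat) (hi : i < l.length)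
    (hps : ¬ pvIsPathStart l i = false)
    (hbf : 0 < i ∧ pvBoundaryChar (l.getD (i-1) ' ') = false) :
    pvLoopA l i = pvLoopA l (i+1) := by
  unfold pvLoopA
  obtain ⟨k, hk⟩ : ∃ k, l.length - i = k + 1 := ⟨l.length - (i+1), by omega⟩
  rw [hk]
  simp only [pvLoopAGo]
  rw [if_pos hi, if_neg hps, if_pos hbf]
  exact pvLoopAGo_congr l k (l.length - (i+1)) (i+1) (by omega) (by omega)

theorem pvLoopA_emit (l : List Char) (i : Nat) (hi : i < l.length)
    (hps : ¬ pvIsPathStart l i = false)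
    (hbf : ¬ (0 < i ∧ pvBoundaryChar (l.getD (i-1) ' ') = false)) :
    pvLoopA l i =
      if pvNormalize (PySem.List.slice l (some (i:Int)) (some ((pvEndScan l i : Nat):Int))) = [] then
        pvLoopA l (Nat.max (pvEndScan l i) (i+1))
      else
        (String.ofList (pvNormalize (PySem.List.slice l (some (i:Int)) (some ((pvEndScan l i : Nat):Int)))),
         (i:Int),
         (i:Int) + (pvNormalize (PySem.List.slice l (some (i:Int)) (some ((pvEndScan l i : Nat):Int)))).length) ::
        pvLoopA l (Nat.max (pvEndScan l i) (i+1)) := by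
  unfold pvLoopA
  obtain ⟨k, hk⟩ : ∃ k, l.length - i = k + 1 := ⟨l.length - (i+1), by omega⟩
  rw [hk]
  simp only [pvLoopAGo]
  rw [if_pos hi, if_neg hps, if_neg hbf]
  have hmax : i + 1 ≤ Nat.max (pvEndScan l i) (i+1) := by
    exact Nat.le_max_right _ _
  rw [pvLoopAGo_congr l k (l.length - Nat.max (pvEndScan l i) (i+1)) _ (by omega) (by omega)]

-- the core correspondence: A's fused loop from index i equals B's filtered runs from i
theorem loopA_eq_runs (l : List Char) :
    ∀ n i, l.length - i ≤ n → pvLoopA l i = (pvRuns l i).filterMap (pvFilt l) := by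
  intro n
  induction n with
  | zero =>
    intro i h
    have hi : ¬ i < l.length := by omega
    rw [pvLoopA_stop l i hi, pvRuns_stop l i hi, List.filterMap_nil]
  | succ n ih =>
    intro i hn
    by_cases hi : i < l.length
    · by_cases ht : pvTermChar (l.getD i ' ') = true
      · -- terminator: A skips (no path start), B's run builder skips
        rw [pvLoopA_skip l i hi (pathStart_of_term l i ht), pvRuns_term l i hi ht]
        exact ih (i+1) (by omega)
      · have ht' : pvTermChar (l.getD i ' ') = false := by simpa using ht
        have he1 : i + 1 ≤ pvRunEnd l i := by
          rw [pvRunEnd_succ l i hi ht']; exact pvRunEnd_ge l (i+1)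
        rw [pvRuns_run l i hi ht', List.filterMap_cons]
        -- inner positions of the run contribute nothing
        have hL : (pvRuns l (i+1)).filterMap (pvFilt l)
            = (pvRuns l (pvRunEnd l i)).filterMap (pvFilt l) := by
          by_cases h1 : (i+1) < l.length ∧ pvTermChar (l.getD (i+1) ' ') = false
          · have hbnone : pvFilt l (i+1, pvRunEnd l (i+1)) = none := by
              unfold pvFilt
              rw [if_pos]
              exact ⟨Nat.succ_pos i, by simpa using boundary_of_term _ ht'⟩
            rw [pvRuns_run l (i+1) h1.1 h1.2, List.filterMap_cons, hbnone,
                pvRunEnd_succ l i hi ht']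
          · have : pvRunEnd l i = i + 1 := by
              rw [pvRunEnd_succ l i hi ht', pvRunEnd_stop l (i+1) h1]
            rw [this]
        by_cases hps : pvIsPathStart l i = false
        · -- A: not a path start, skip; B: run filtered out by _is_path_start
          have hfn : pvFilt l (i, pvRunEnd l i) = none := by
            unfold pvFilt
            simp only [hps, if_true]
            split_ifs <;> rfl
          rw [pvLoopA_skip l i hi hps, ih (i+1) (by omega), hL, hfn]
        · by_cases hbf : 0 < i ∧ pvBoundaryChar (l.getD (i-1) ' ') = false
          · -- boundary-before fails on both sides
            have hfn : pvFilt l (i, pvRunEnd l i) = none := by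
              unfold pvFilt; rw [if_pos hbf]
            rw [pvLoopA_skipb l i hi hps hbf, ih (i+1) (by omega), hL, hfn]
          · -- A emits (or drops) the token for this run and jumps to its end
            have hihe : pvLoopA l (pvRunEnd l i) = (pvRuns l (pvRunEnd l i)).filterMap (pvFilt l) :=
              ih (pvRunEnd l i) (by omega)
            have hmax : Nat.max (pvRunEnd l i) (i+1) = pvRunEnd l i := Nat.max_eq_left he1
            rw [pvLoopA_emit l i hi hps hbf, pvEndScan_eq, hmax]
            by_cases htok : pvNormalize (PySem.List.slice l (some (i:Int)) (some ((pvRunEnd l i : Nat):Int))) = []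
            · have hfn : pvFilt l (i, pvRunEnd l i) = none := by
                unfold pvFilt
                rw [if_neg hbf, if_neg hps, if_pos htok]
              rw [if_pos htok, hfn, hihe]
            · have hfs : pvFilt l (i, pvRunEnd l i)
                  = some (String.ofList (pvNormalize (PySem.List.slice l (some (i:Int)) (some ((pvRunEnd l i : Nat):Int)))),
                          (i:Int),
                          (i:Int) + (pvNormalize (PySem.List.slice l (some (i:Int)) (some ((pvRunEnd l i : Nat):Int)))).length) := by
                unfold pvFilt
                rw [if_neg hbf, if_neg hps, if_neg htok]
              rw [if_neg htok, hfs, hihe]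
    · rw [pvLoopA_stop l i hi, pvRuns_stop l i hi, List.filterMap_nil]

-- ===== VERDICT (by name: the statement is the Claim_ definition above) =====
theorem scan_path_candidates_py_spec : Claim_equal_scan_path_candidates_py := by
  intro text _
  unfold Spec_scan_path_candidates_py scan_path_candidates_py scan_path_candidates_py_alt
  exact loopA_eq_runs text.toList text.toList.length 0 (by omega)
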